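-- pv_equiv track=rewrite | github.com/seul1009/CodingTest | PCCP/PCCP_1.py | solution
-- ===== SOURCE A (Python) =====
-- def solution(input_string):
--     alp = set()
--     lonely = set()
--
--     prev = ''
--     for string in input_string:
--         if string != prev and string in alp:
--             lonely.add(string)
--         alp.add(string)
--         prev = string
--
--     return "".join(sorted(lonely)) if lonely else "N"
-- ===== SOURCE B (Python) =====
-- def solution(input_string):
--     # run heads: first char of each maximal run of equal consecutive chars
--     heads = [c for p, c in zip([None] + list(input_string), input_string) if c != p]
--     return "".join(sorted({c for c in heads if heads.count(c) >= 2})) or "N"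
-- ===== Notes on version B (the rewrite author's own statement) =====
-- stated objective: alternative
-- what changed: B first materialises the list of run heads (first char of each maximal run) via zip with the shifted string, then selects the characters whose run count is at least 2 with a set comprehension, replacing A's single pass with prev/alp/lonely set bookkeeping.
import Mathlib
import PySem

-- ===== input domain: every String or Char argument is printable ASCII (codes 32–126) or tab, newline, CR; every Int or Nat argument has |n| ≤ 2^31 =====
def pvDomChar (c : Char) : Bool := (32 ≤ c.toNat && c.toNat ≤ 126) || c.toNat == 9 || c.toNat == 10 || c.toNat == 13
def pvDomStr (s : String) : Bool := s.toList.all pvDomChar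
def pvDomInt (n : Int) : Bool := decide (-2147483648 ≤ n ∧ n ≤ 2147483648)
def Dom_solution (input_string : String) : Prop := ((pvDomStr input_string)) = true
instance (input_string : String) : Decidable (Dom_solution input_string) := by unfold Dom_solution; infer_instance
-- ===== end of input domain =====

-- B recomputes the answer from the explicit list of run heads instead of A's inline
-- prev/alp/lonely bookkeeping; alternative decomposition, equal return value everywhere.

-- ===== PORT A =====
-- loop body of A's for-loop; Python's initial prev = '' (never equal to a char) is modelled as none
def stepA (st : PySem.Set Char × PySem.Set Char × Option Char) (c : Char) :
    PySem.Set Char × PySem.Set Char × Option Char :=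
  (PySem.Set.add st.1 c,
   (if some c ≠ st.2.2 ∧ c ∈ st.1 then PySem.Set.add st.2.1 c else st.2.1),
   some c)

def solution (input_string : String) : String :=
  let st := input_string.toList.foldl stepA (PySem.Set.empty, PySem.Set.empty, none)
  let lonely := st.2.1
  if lonely ≠ [] then String.ofList (PySem.List.sorted lonely (fun x => x) false) else "N"

-- ===== PORT B =====
def solution_alt (input_string : String) : String :=
  let l := input_string.toList
  -- [c for p, c in zip([None] + list(s), s) if c != p]
  let heads := (((none : Option Char) :: l.map some).zip l).filterMap
      (fun pc => if some pc.2 ≠ pc.1 then some pc.2 else none)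
  -- "".join(sorted({c for c in heads if heads.count(c) >= 2}))
  let res := String.ofList (PySem.List.sorted
      (PySem.Set.ofList (heads.filter (fun c => 2 ≤ heads.count c))) (fun x => x) false)
  if res ≠ "" then res else "N"

-- ===== PRECONDITION & SPEC =====
def Spec_solution (input_string : String) (out : String) : Prop := out = solution_alt input_string
instance (input_string : String) (out : String) : Decidable (Spec_solution input_string out) := by unfold Spec_solution; infer_instance

-- ===== CLAIM (what is proved, stated in full; the proofs are below) =====
def Claim_equal_solution : Prop := ∀ (input_string : String), Dom_solution input_string → Spec_solution input_string (solution input_string)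

-- ===== LEMMAS AND PROOFS =====

-- run heads of l when the char just before l was prev
def headsFrom (prev : Option Char) : List Char → List Char
  | [] => []
  | c :: t => (if some c = prev then [] else [c]) ++ headsFrom (some c) t

theorem headsB (l : List Char) (prev : Option Char) :
    ((prev :: l.map some).zip l).filterMap
      (fun pc => if some pc.2 ≠ pc.1 then some pc.2 else none) = headsFrom prev l := by
  induction l generalizing prev with
  | nil => rfl
  | cons c t ih =>
      simp only [List.map_cons, List.zip_cons_cons, List.filterMap_cons, headsFrom]
      by_cases h : some c = prev
      · rw [if_neg (not_not_intro h), if_pos h]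
        simpa using ih (some c)
      · rw [if_pos h, if_neg h]
        simpa using ih (some c)

theorem lonely_mem (l : List Char) (alp lonely : PySem.Set Char) (prev : Option Char)
    (hprev : ∀ a, prev = some a → a ∈ alp) (x : Char) :
    x ∈ (l.foldl stepA (alp, lonely, prev)).2.1 ↔
      x ∈ lonely ∨ (x ∈ headsFrom prev l ∧ (x ∈ alp ∨ 2 ≤ (headsFrom prev l).count x)) := by
  induction l generalizing alp lonely prev with
  | nil => simp [headsFrom]
  | cons c t ih =>
      have hprev' : ∀ a, (some c : Option Char) = some a → a ∈ PySem.Set.add alp c := by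
        intro a ha
        cases ha
        exact (PySem.Set.mem_add _ _ _).mpr (Or.inr rfl)
      rw [List.foldl_cons]
      by_cases hp : (some c : Option Char) = prev
      · have hc : c ∈ alp := hprev c hp.symm
        have hstep : stepA (alp, lonely, prev) c = (PySem.Set.add alp c, lonely, some c) := by
          simp [stepA, hp]
        rw [hstep, ih _ _ _ hprev']
        have hh : headsFrom prev (c :: t) = headsFrom (some c) t := by
          simp [headsFrom, hp]
        rw [hh]
        constructor
        · rintro (h | ⟨h1, h2 | h2⟩)
          · exact Or.inl h
          · rcases (PySem.Set.mem_add _ _ _).mp h2 with h2 | h2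
            · exact Or.inr ⟨h1, Or.inl h2⟩
            · subst h2; exact Or.inr ⟨h1, Or.inl hc⟩
          · exact Or.inr ⟨h1, Or.inr h2⟩
        · rintro (h | ⟨h1, h2 | h2⟩)
          · exact Or.inl h
          · exact Or.inr ⟨h1, Or.inl ((PySem.Set.mem_add _ _ _).mpr (Or.inl h2))⟩
          · exact Or.inr ⟨h1, Or.inr h2⟩
      · have hh : headsFrom prev (c :: t) = c :: headsFrom (some c) t := by
          simp [headsFrom, hp]
        rw [hh]
        have hstep : stepA (alp, lonely, prev) c =
            (PySem.Set.add alp c,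
             (if c ∈ alp then PySem.Set.add lonely c else lonely), some c) := by
          simp [stepA, hp]
        rw [hstep, ih _ _ _ hprev']
        by_cases hx : x = c
        · subst hx
          have h2 : x ∈ (if x ∈ alp then PySem.Set.add lonely x else lonely) ↔
              (x ∈ lonely ∨ x ∈ alp) := by
            split
            · rename_i hin
              rw [PySem.Set.mem_add]
              exact ⟨fun h => h.elim Or.inl (fun _ => Or.inr hin),
                     fun h => h.elim Or.inl (fun _ => Or.inr rfl)⟩
            · rename_i hin
              exact ⟨Or.inl, fun h => h.elim id (fun h' => absurd h' hin)⟩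
          rw [h2, PySem.Set.mem_add]
          by_cases hl : x ∈ lonely <;> by_cases ha : x ∈ alp <;>
            simp [hl, ha, List.count_cons_self, ← List.count_pos_iff]
        · have hadd : x ∈ PySem.Set.add alp c ↔ x ∈ alp := by
            rw [PySem.Set.mem_add]; exact or_iff_left hx
          have hmemif : x ∈ (if c ∈ alp then PySem.Set.add lonely c else lonely) ↔
              x ∈ lonely := by
            split
            · rw [PySem.Set.mem_add]; exact or_iff_left hx
            · exact Iff.rfl
          rw [hmemif, hadd, List.count_cons_of_ne (Ne.symm hx)]
          simp only [List.mem_cons]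
          constructor
          · rintro (h | ⟨h1, h2⟩)
            · exact Or.inl h
            · exact Or.inr ⟨Or.inr h1, h2⟩
          · rintro (h | ⟨h1 | h1, h2⟩)
            · exact Or.inl h
            · exact absurd h1 hx
            · exact Or.inr ⟨h1, h2⟩

theorem lonely_nodup (l : List Char) (alp lonely : PySem.Set Char) (prev : Option Char)
    (h : lonely.Nodup) : ((l.foldl stepA (alp, lonely, prev)).2.1).Nodup := by
  induction l generalizing alp lonely prev with
  | nil => exact h
  | cons c t ih =>
      rw [List.foldl_cons]
      apply ih
      split
      · exact PySem.Set.nodup_add _ _ h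
      · exact h

-- ===== VERDICT (by name: the statement is the Claim_ definition above) =====
theorem solution_spec : Claim_equal_solution := by
  intro s _
  unfold Spec_solution solution solution_alt
  simp only
  rw [headsB]
  set l := s.toList
  set L := (l.foldl stepA (PySem.Set.empty, PySem.Set.empty, none)).2.1 with hL
  set H := headsFrom none l with hH
  set B := PySem.Set.ofList (H.filter (fun c => 2 ≤ H.count c)) with hB
  have hmem : ∀ x, x ∈ L ↔ x ∈ B := by
    intro x
    rw [hL, lonely_mem l _ _ _ (by intro a h; cases h) x, hB, PySem.Set.mem_ofList,
      List.mem_filter, ← hH]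
    simp [PySem.Set.empty]
  have hperm : L.Perm B :=
    (List.perm_ext_iff_of_nodup
      (lonely_nodup l _ _ _ List.nodup_nil) (PySem.Set.nodup_ofList _)).mpr hmem
  have hsort : PySem.List.sorted L (fun x => x) false = PySem.List.sorted B (fun x => x) false :=
    (PySem.List.sorted_eq_sorted_of_perm L B (fun x => x) (fun _ _ h => h) hperm)
  rw [← hsort]
  by_cases hnil : L = []
  · have hs0 : PySem.List.sorted ([] : List Char) (fun x => x) false = [] := rfl
    simp [hnil, hs0]
  · have hs : PySem.List.sorted L (fun x => x) false ≠ [] := by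
      simpa [PySem.List.sorted_eq_nil_iff] using hnil
    have hne : String.ofList (PySem.List.sorted L (fun x => x) false) ≠ "" := by
      intro h
      exact hs (by simpa using congrArg String.toList h)
    simp [hnil, hne]
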